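-- pv_equiv track=rewrite | github.com/seanzmc/27vette | archived/docs/fusion-plan/build_rule_mapping.py | build_rpo_index
-- ===== SOURCE A (Python) =====
-- from collections import Counter, OrderedDict, defaultdict
--
-- def build_rpo_index(rows: list[dict[str, str]]) -> dict[str, list[str]]:
--     rpo_to_option_ids: dict[str, list[str]] = defaultdict(list)
--     for row in rows:
--         rpo = row.get("rpo", "").strip().upper()
--         option_id = row.get("option_id", "").strip()
--         if rpo and option_id and option_id not in rpo_to_option_ids[rpo]:
--             rpo_to_option_ids[rpo].append(option_id)
--     return rpo_to_option_ids
-- ===== SOURCE B (Python) =====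
-- from collections import defaultdict
--
-- def build_rpo_index(rows: list[dict[str, str]]) -> dict[str, list[str]]:
--     # Stage 1: normalise every row once, keep the valid (rpo, option_id) pairs.
--     norm = [(row.get("rpo", "").strip().upper(), row.get("option_id", "").strip())
--             for row in rows]
--     valid = [p for p in norm if p[0] and p[1]]
--     # Stage 2: per-key extraction — for each first-seen RPO, pull out its ids and
--     # deduplicate them in order; assign the finished list in one go.
--     index: dict[str, list[str]] = defaultdict(list)
--     for rpo in dict.fromkeys(r for r, _ in valid):
--         index[rpo] = list(dict.fromkeys(o for r, o in valid if r == rpo))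
--     return index
-- ===== Notes on version B (the rewrite author's own statement) =====
-- stated objective: alternative
-- what changed: A builds the index incrementally in one row loop with a per-key membership scan; B works in staged passes: normalise all rows to pairs, filter the valid ones, then for each first-seen RPO key extract and order-deduplicate its ids in one assignment (per-key extraction instead of incremental dict building).
import Mathlib
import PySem

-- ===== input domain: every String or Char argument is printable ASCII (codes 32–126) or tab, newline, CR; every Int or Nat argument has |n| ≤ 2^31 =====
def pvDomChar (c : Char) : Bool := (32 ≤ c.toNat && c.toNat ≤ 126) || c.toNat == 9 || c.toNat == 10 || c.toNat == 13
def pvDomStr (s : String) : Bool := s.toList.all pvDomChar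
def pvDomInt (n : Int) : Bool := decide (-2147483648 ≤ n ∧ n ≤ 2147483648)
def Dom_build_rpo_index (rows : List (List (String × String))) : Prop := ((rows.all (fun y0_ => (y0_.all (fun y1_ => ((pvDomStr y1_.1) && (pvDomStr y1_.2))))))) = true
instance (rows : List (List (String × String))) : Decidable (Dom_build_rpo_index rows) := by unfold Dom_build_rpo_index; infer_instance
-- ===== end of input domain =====

-- B replaces A's incremental dict building (one row loop, per-key membership scan) by
-- staged passes: normalise all rows, filter the valid pairs, then per first-seen key
-- extract and order-deduplicate that key's ids in one assignment; objective: alternative.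

-- shared normalisation (identical lines in both Pythons):
-- rpo = row.get("rpo", "").strip().upper();  option_id = row.get("option_id", "").strip()
def pvNormRow (row : List (String × String)) : String × String :=
  (PySem.Str.upper (PySem.Str.strip (PySem.Dict.getD (PySem.Dict.mk row) "rpo" "")),
   PySem.Str.strip (PySem.Dict.getD (PySem.Dict.mk row) "option_id" ""))

-- ===== PORT A =====
def build_rpo_index (rows : List (List (String × String))) : List (String × List String) :=
  (rows.foldl (fun d row =>
      let rpo := (pvNormRow row).1
      let oid := (pvNormRow row).2
      if rpo ≠ "" ∧ oid ≠ "" ∧ oid ∉ d.getD rpo [] then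
        d.insert rpo (d.getD rpo [] ++ [oid])
      else d)
    (PySem.Dict.empty : PySem.Dict String (List String))).items

-- ===== PORT B =====
def build_rpo_index_alt (rows : List (List (String × String))) : List (String × List String) :=
  let norm := rows.map pvNormRow
  let valid := norm.filter (fun p => p.1 != "" && p.2 != "")
  ((PySem.List.dedup (valid.map Prod.fst)).foldl
      (fun d k =>
        d.insert k (PySem.List.dedup ((valid.filter (fun p => p.1 == k)).map Prod.snd)))
      (PySem.Dict.empty : PySem.Dict String (List String))).items

-- ===== PRECONDITION & SPEC =====
def Spec_build_rpo_index (rows : List (List (String × String))) (out : List (String × List String)) : Prop := out = build_rpo_index_alt rows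
instance (rows : List (List (String × String))) (out : List (String × List String)) : Decidable (Spec_build_rpo_index rows out) := by unfold Spec_build_rpo_index; infer_instance

-- ===== CLAIM (what is proved, stated in full; the proofs are below) =====
def Claim_equal_build_rpo_index : Prop := ∀ (rows : List (List (String × String))), Dom_build_rpo_index rows → Spec_build_rpo_index rows (build_rpo_index rows)

-- ===== LEMMAS AND PROOFS =====

-- the valid pairs, as A's loop sees them
def pvToPair? (row : List (String × String)) : Option (String × String) :=
  let n := pvNormRow row
  if n.1 ≠ "" ∧ n.2 ≠ "" then some n else none

def pvStepA (d : PySem.Dict String (List String)) (p : String × String) :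
    PySem.Dict String (List String) :=
  if p.2 ∈ d.getD p.1 [] then d else d.insert p.1 (d.getD p.1 [] ++ [p.2])

-- A's row loop is pvStepA folded over the valid pairs
theorem pvA_fold (rows : List (List (String × String))) (d : PySem.Dict String (List String)) :
    rows.foldl (fun d row =>
      let rpo := (pvNormRow row).1
      let oid := (pvNormRow row).2
      if rpo ≠ "" ∧ oid ≠ "" ∧ oid ∉ d.getD rpo [] then
        d.insert rpo (d.getD rpo [] ++ [oid])
      else d) d
    = (rows.filterMap pvToPair?).foldl pvStepA d := by
  induction rows generalizing d with
  | nil => rfl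
  | cons row rows ih =>
    simp only [List.foldl_cons, List.filterMap_cons]
    by_cases h : (pvNormRow row).1 ≠ "" ∧ (pvNormRow row).2 ≠ ""
    · by_cases hm : (pvNormRow row).2 ∈ d.getD (pvNormRow row).1 []
      · simp [pvToPair?, h, pvStepA, hm, ih]
      · simp [pvToPair?, h, pvStepA, hm, ih]
    · rw [if_neg (fun hc => h ⟨hc.1, hc.2.1⟩)]
      simp [pvToPair?, h, ih]

-- B's staged normalisation+filter yields the same valid pairs
theorem pvB_valid (rows : List (List (String × String))) :
    (rows.map pvNormRow).filter (fun p => p.1 != "" && p.2 != "")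
      = rows.filterMap pvToPair? := by
  induction rows with
  | nil => rfl
  | cons row rows ih =>
    simp only [List.map_cons, List.filter_cons, List.filterMap_cons]
    by_cases h : (pvNormRow row).1 ≠ "" ∧ (pvNormRow row).2 ≠ ""
    · simp [pvToPair?, h, ih]
    · simp [pvToPair?, h, ih]

-- dedup of a snoc
theorem pvDedup_snoc {α : Type} [DecidableEq α] (xs : List α) (x : α) :
    PySem.List.dedup (xs ++ [x])
      = if x ∈ xs then PySem.List.dedup xs else PySem.List.dedup xs ++ [x] := by
  by_cases h : x ∈ xs
  · simp [PySem.List.dedup_eq_ofList, PySem.Set.ofList_append_singleton, h]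
  · simp [PySem.List.dedup_eq_ofList, PySem.Set.ofList_append_singleton, h]

-- keys of A's fold are the first-seen distinct rpo values
theorem pvKeysA (qs : List (String × String)) :
    (qs.foldl pvStepA (PySem.Dict.empty : PySem.Dict String (List String))).keys
      = PySem.List.dedup (qs.map Prod.fst) := by
  induction qs using List.reverseRecOn with
  | nil => rfl
  | append_singleton qs p ih =>
    rw [List.foldl_append, List.foldl_cons, List.foldl_nil, List.map_append, List.map_cons,
      List.map_nil, pvDedup_snoc]
    set D := qs.foldl pvStepA (PySem.Dict.empty : PySem.Dict String (List String)) with hD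
    by_cases hc : D.contains p.1 = true
    · have hk : p.1 ∈ qs.map Prod.fst := by
        rw [← PySem.List.mem_dedup, ← ih]
        exact (PySem.Dict.contains_iff_mem_keys D p.1).1 hc
      rw [if_pos hk, ← ih]
      simp only [pvStepA]
      split_ifs with hm
      · rfl
      · exact PySem.Dict.keys_insert_of_contains D _ hc
    · have hc' : D.contains p.1 = false := by
        cases h : D.contains p.1
        · rfl
        · exact absurd h hc
      have hk : p.1 ∉ qs.map Prod.fst := by
        rw [← PySem.List.mem_dedup, ← ih]
        exact fun h => hc ((PySem.Dict.contains_iff_mem_keys D p.1).2 h)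
      have hm : p.2 ∉ D.getD p.1 [] := by
        rw [PySem.Dict.getD_of_not_contains D [] hc']
        simp
      rw [if_neg hk, ← ih]
      simp only [pvStepA]
      rw [if_neg hm]
      exact PySem.Dict.keys_insert_of_not_contains D _ hc'

-- each key's accumulated list is the order-dedup of its ids
theorem pvValA (qs : List (String × String)) (k : String) :
    (qs.foldl pvStepA (PySem.Dict.empty : PySem.Dict String (List String))).getD k []
      = PySem.List.dedup ((qs.filter (fun p => p.1 == k)).map Prod.snd) := by
  induction qs using List.reverseRecOn generalizing k with
  | nil => rfl
  | append_singleton qs p ih =>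
    rw [List.foldl_append, List.foldl_cons, List.foldl_nil, List.filter_append,
      List.filter_cons, List.filter_nil]
    set D := qs.foldl pvStepA (PySem.Dict.empty : PySem.Dict String (List String)) with hD
    by_cases hk : p.1 = k
    · subst hk
      rw [if_pos (by simp), List.map_append, List.map_cons, List.map_nil, pvDedup_snoc]
      by_cases hm : p.2 ∈ D.getD p.1 []
      · have hM : p.2 ∈ (qs.filter (fun p' => p'.1 == p.1)).map Prod.snd := by
          rw [← PySem.List.mem_dedup, ← ih]
          exact hm
        rw [if_pos hM, ← ih]
        simp [pvStepA, hm]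
      · have hM : p.2 ∉ (qs.filter (fun p' => p'.1 == p.1)).map Prod.snd := by
          rw [← PySem.List.mem_dedup, ← ih]
          exact hm
        rw [if_neg hM, ← ih]
        simp only [pvStepA]
        rw [if_neg hm, PySem.Dict.getD_insert_self]
    · have hbe : (p.1 == k) = false := by simp [hk]
      rw [if_neg (by simp [hbe]), List.append_nil]
      have hne : k ≠ p.1 := fun h => hk h.symm
      simp only [pvStepA]
      split_ifs with hm
      · exact ih k
      · rw [PySem.Dict.getD_insert_of_ne D _ _ hne]
        exact ih k

-- ===== VERDICT (by name: the statement is the Claim_ definition above) =====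
theorem build_rpo_index_spec : Claim_equal_build_rpo_index := by
  intro rows _
  unfold Spec_build_rpo_index build_rpo_index
  simp only [build_rpo_index_alt]
  rw [pvA_fold, pvB_valid]
  set qs := rows.filterMap pvToPair? with hqs
  set D := qs.foldl pvStepA (PySem.Dict.empty : PySem.Dict String (List String)) with hD
  have hnd : D.keys.Nodup := by rw [hD, pvKeysA]; exact PySem.List.nodup_dedup _
  have hB := PySem.Dict.items_foldl_insert_fresh (ν := List String)
      (PySem.List.dedup (qs.map Prod.fst)) (fun x => x)
      (fun k => PySem.List.dedup ((qs.filter (fun p => p.1 == k)).map Prod.snd))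
      PySem.Dict.empty
      (fun a _ => PySem.Dict.contains_empty a)
      (by simp)
  beta_reduce at hB
  rw [hB, PySem.Dict.items_eq_map_keys D hnd [], hD, pvKeysA]
  exact List.map_congr_left (fun k _ => by rw [← hD, pvValA])
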